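-- pv_equiv track=rewrite | github.com/JS-961/Project-Sentry | ml/src/sentry_ml/train_advisory_model.py | timestamp_source
-- ===== SOURCE A (Python) =====
-- def timestamp_source(columns: list[str]) -> str:
--     compacted = {"".join(ch for ch in column.lower() if ch.isalnum()) for column in columns}
--     if "secondselapsed" in compacted or "elapsedseconds" in compacted:
--         return "elapsed_seconds"
--     if any("millisecond" in column or column == "ms" for column in compacted):
--         return "elapsed_ms"
--     if {"timestamp", "time", "unixtimestamp"} & compacted:
--         return "timestamp"
--     return "synthetic_sample_rate_fallback"
-- ===== SOURCE B (Python) =====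
-- _CATEGORIES = ("elapsed_seconds", "elapsed_ms", "timestamp", "synthetic_sample_rate_fallback")
--
--
-- def _rank(column: str) -> int:
--     """Numeric priority of one column name (0 = best, 3 = no match)."""
--     s = "".join(ch for ch in column.lower() if ch.isalnum())
--     if s in ("secondselapsed", "elapsedseconds"):
--         return 0
--     if "millisecond" in s or s == "ms":
--         return 1
--     if s in ("timestamp", "time", "unixtimestamp"):
--         return 2
--     return 3
--
--
-- def timestamp_source(columns: list[str]) -> str:
--     best = min(map(_rank, columns), default=3)
--     return _CATEGORIES[best]
-- ===== Notes on version B (the rewrite author's own statement) =====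
-- stated objective: alternative
-- what changed: B classifies each column independently into a numeric priority rank (0..3), reduces the list with min, and indexes a category table by the minimum rank, instead of A's 'build a set of compacted names then run three set-membership/scan checks in priority order'.
import Mathlib
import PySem

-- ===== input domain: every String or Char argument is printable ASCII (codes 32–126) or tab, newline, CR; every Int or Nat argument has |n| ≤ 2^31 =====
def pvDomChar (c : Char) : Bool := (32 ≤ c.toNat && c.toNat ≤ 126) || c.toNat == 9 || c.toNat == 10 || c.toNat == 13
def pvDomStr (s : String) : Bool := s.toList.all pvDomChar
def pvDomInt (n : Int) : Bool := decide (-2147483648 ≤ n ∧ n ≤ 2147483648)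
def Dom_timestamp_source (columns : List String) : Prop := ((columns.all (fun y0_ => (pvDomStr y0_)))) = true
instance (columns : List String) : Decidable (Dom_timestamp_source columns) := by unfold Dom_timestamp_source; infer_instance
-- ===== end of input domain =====

-- B replaces A's build-a-set-then-three-checks with per-column numeric ranks reduced by min and a table lookup (alternative algorithm; same cost).


-- ===== PORT A =====
-- "".join(ch for ch in column.lower() if ch.isalnum())  (shared normalization helper)
def pvCompact (column : String) : String :=
  String.mk ((PySem.Chars.lower column.toList).filter PySem.Chars.isalnum)

def timestamp_source (columns : List String) : String :=
  let compacted : PySem.Set String := PySem.Set.ofList (columns.map pvCompact)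
  if PySem.Set.contains compacted "secondselapsed" || PySem.Set.contains compacted "elapsedseconds" then
    "elapsed_seconds"
  else if compacted.any (fun column => PySem.Str.isIn "millisecond" column || column == "ms") then
    "elapsed_ms"
  else if !(PySem.Set.inter (PySem.Set.ofList ["timestamp", "time", "unixtimestamp"]) compacted).isEmpty then
    "timestamp"
  else
    "synthetic_sample_rate_fallback"

-- ===== PORT B =====
-- numeric priority of one column (0 best .. 3 no match)
def pvRank (column : String) : Nat :=
  let s := pvCompact column
  if s == "secondselapsed" || s == "elapsedseconds" then 0
  else if PySem.Str.isIn "millisecond" s || s == "ms" then 1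
  else if s == "timestamp" || s == "time" || s == "unixtimestamp" then 2
  else 3

-- min(map(_rank, columns), default=3); then table lookup by the minimum rank
def timestamp_source_alt (columns : List String) : String :=
  let best := (columns.map pvRank).foldl Nat.min 3
  ["elapsed_seconds", "elapsed_ms", "timestamp", "synthetic_sample_rate_fallback"].getD best ""

-- ===== PRECONDITION & SPEC =====
def Spec_timestamp_source (columns : List String) (out : String) : Prop := out = timestamp_source_alt columns
instance (columns : List String) (out : String) : Decidable (Spec_timestamp_source columns out) := by unfold Spec_timestamp_source; infer_instance

-- ===== CLAIM (what is proved, stated in full; the proofs are below) =====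
def Claim_equal_timestamp_source : Prop := ∀ (columns : List String), Dom_timestamp_source columns → Spec_timestamp_source columns (timestamp_source columns)

-- ===== LEMMAS AND PROOFS =====
def pvEc (c : String) : Bool := pvCompact c == "secondselapsed" || pvCompact c == "elapsedseconds"
def pvMc (c : String) : Bool := PySem.Str.isIn "millisecond" (pvCompact c) || pvCompact c == "ms"
def pvTc (c : String) : Bool := pvCompact c == "timestamp" || (pvCompact c == "time" || pvCompact c == "unixtimestamp")

theorem pv_any_ofList {α : Type} [BEq α] [LawfulBEq α] (l : List α) (p : α → Bool) :
    (PySem.Set.ofList l).any p = l.any p := by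
  rcases hx : l.any p with _ | _
  · rw [List.any_eq_false] at hx
    rw [List.any_eq_false]
    intro x hxm
    exact hx x ((PySem.Set.mem_ofList _ _).1 hxm)
  · rw [List.any_eq_true] at hx
    obtain ⟨x, hxm, hpx⟩ := hx
    rw [List.any_eq_true]
    exact ⟨x, (PySem.Set.mem_ofList _ _).2 hxm, hpx⟩

theorem pv_contains_any (l : List String) (v : String) :
    PySem.Set.contains (PySem.Set.ofList (l.map pvCompact)) v = l.any (fun c => pvCompact c == v) := by
  rcases h : l.any (fun c => pvCompact c == v) with _ | _
  · rw [List.any_eq_false] at h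
    rw [Bool.eq_false_iff]
    intro hc
    have hm := (PySem.Set.mem_ofList _ _).1 ((PySem.Set.contains_iff _ _).1 hc)
    obtain ⟨x, hxm, hxe⟩ := List.mem_map.1 hm
    exact absurd (beq_iff_eq.2 hxe) (by simpa using h x hxm)
  · rw [List.any_eq_true] at h
    obtain ⟨x, hxm, hxe⟩ := h
    exact (PySem.Set.contains_iff _ _).2 ((PySem.Set.mem_ofList _ _).2
      (List.mem_map.2 ⟨x, hxm, beq_iff_eq.1 hxe⟩))

theorem pv_inter_nonempty (S : List String) (l : List String) :
    (!(PySem.Set.inter (PySem.Set.ofList S) (PySem.Set.ofList (l.map pvCompact))).isEmpty)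
      = l.any (fun c => S.any (fun v => pvCompact c == v)) := by
  rcases h : l.any (fun c => S.any (fun v => pvCompact c == v)) with _ | _
  · rw [Bool.not_eq_false', List.isEmpty_iff, List.eq_nil_iff_forall_not_mem]
    intro x hx
    obtain ⟨hxs, hxc⟩ := (PySem.Set.mem_inter _ _ _).1 hx
    have hxs' := (PySem.Set.mem_ofList _ _).1 hxs
    have hxc' := (PySem.Set.mem_ofList _ _).1 hxc
    obtain ⟨c, hcm, hce⟩ := List.mem_map.1 hxc'
    rw [List.any_eq_false] at h
    exact h c hcm (List.any_eq_true.2 ⟨x, hxs', beq_iff_eq.2 hce⟩)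
  · rw [List.any_eq_true] at h
    obtain ⟨c, hcm, hc⟩ := h
    rw [List.any_eq_true] at hc
    obtain ⟨v, hvm, hve⟩ := hc
    simp only [Bool.not_eq_eq_eq_not, Bool.not_true, List.isEmpty_eq_false_iff_exists_mem]
    exact ⟨v, (PySem.Set.mem_inter _ _ _).2 ⟨(PySem.Set.mem_ofList _ _).2 hvm,
      (PySem.Set.mem_ofList _ _).2 (List.mem_map.2 ⟨c, hcm, beq_iff_eq.1 hve⟩)⟩⟩

-- A in canonical "three List.any checks" form
theorem pv_A_canon (columns : List String) :
    timestamp_source columns =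
      if columns.any pvEc then "elapsed_seconds"
      else if columns.any pvMc then "elapsed_ms"
      else if columns.any pvTc then "timestamp"
      else "synthetic_sample_rate_fallback" := by
  unfold timestamp_source
  simp only [pv_contains_any, pv_inter_nonempty]
  rw [pv_any_ofList]
  have h1 : (columns.any (fun c => pvCompact c == "secondselapsed")
      || columns.any (fun c => pvCompact c == "elapsedseconds")) = columns.any pvEc := by
    induction columns with
    | nil => simp
    | cons h t ih =>
      simp only [List.any_cons, pvEc] at *
      cases pvCompact h == "secondselapsed" <;> cases pvCompact h == "elapsedseconds" <;>
        simp_all [Bool.or_comm]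
  rw [h1, List.any_map]
  simp only [Function.comp_def, List.any_cons, List.any_nil, Bool.or_false]
  rfl

theorem pv_any_congr {α : Type} (l : List α) (p q : α → Bool)
    (h : ∀ x ∈ l, p x = q x) : l.any p = l.any q := by
  induction l with
  | nil => rfl
  | cons a t ih =>
    simp only [List.any_cons, h a (List.mem_cons_self), ih (fun x hx => h x (List.mem_cons_of_mem _ hx))]

theorem pv_rank_le (c : String) : pvRank c ≤ 3 := by
  unfold pvRank; dsimp only; split_ifs <;> omega

theorem pv_rank0 (c : String) : (pvRank c == 0) = pvEc c := by
  unfold pvRank pvEc; dsimp only; split_ifs with h1 h2 h3 <;> simp_all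

theorem pv_rank1 (c : String) (hE : pvEc c = false) : (pvRank c == 1) = pvMc c := by
  unfold pvRank pvMc
  unfold pvEc at hE
  dsimp only; split_ifs with h1 h2 h3 <;> simp_all

theorem pv_rank2 (c : String) (hE : pvEc c = false) (hM : pvMc c = false) :
    (pvRank c == 2) = pvTc c := by
  unfold pvRank pvTc
  unfold pvEc at hE; unfold pvMc at hM
  dsimp only; split_ifs with h1 h2 h3 <;> simp_all [or_assoc]

-- the min-fold is determined by which rank values occur
theorem pv_foldl_min (columns : List String) (a : Nat) (ha : a ≤ 3) :
    (columns.map pvRank).foldl Nat.min a =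
      min a (if columns.any (fun c => pvRank c == 0) then 0
             else if columns.any (fun c => pvRank c == 1) then 1
             else if columns.any (fun c => pvRank c == 2) then 2
             else 3) := by
  induction columns generalizing a with
  | nil => simp; omega
  | cons h t ih =>
    have hr := pv_rank_le h
    simp only [List.map_cons, List.foldl_cons, List.any_cons]
    rw [ih (min a (pvRank h)) (by omega)]
    have h3 : pvRank h = 0 ∨ pvRank h = 1 ∨ pvRank h = 2 ∨ pvRank h = 3 := by omega
    rcases h3 with h0 | h0 | h0 | h0 <;>
      simp only [h0, Nat.min_assoc, Nat.reduceBEq, beq_self_eq_true,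
        Bool.true_or, Bool.false_or, if_true] <;>
      split_ifs <;> omega

-- ===== VERDICT (by name: the statement is the Claim_ definition above) =====
theorem timestamp_source_spec : Claim_equal_timestamp_source := by
  intro columns _
  unfold Spec_timestamp_source timestamp_source_alt
  rw [pv_A_canon, pv_foldl_min columns 3 (by omega)]
  have hA0 : columns.any (fun c => pvRank c == 0) = columns.any pvEc :=
    pv_any_congr _ _ _ (fun c _ => pv_rank0 c)
  rw [hA0]
  cases hE : columns.any pvEc with
  | true => simp
  | false =>
    have hEm : ∀ c ∈ columns, pvEc c = false :=
      fun c hc => Bool.eq_false_iff.2 (List.any_eq_false.1 hE c hc)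
    have hA1 : columns.any (fun c => pvRank c == 1) = columns.any pvMc :=
      pv_any_congr _ _ _ (fun c hc => pv_rank1 c (hEm c hc))
    rw [hA1]
    cases hM : columns.any pvMc with
    | true => simp
    | false =>
      have hMm : ∀ c ∈ columns, pvMc c = false :=
        fun c hc => Bool.eq_false_iff.2 (List.any_eq_false.1 hM c hc)
      have hA2 : columns.any (fun c => pvRank c == 2) = columns.any pvTc :=
        pv_any_congr _ _ _ (fun c hc => pv_rank2 c (hEm c hc) (hMm c hc))
      rw [hA2]
      cases hT : columns.any pvTc with
      | true => simp
      | false => simp
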